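-- pv_equiv track=rewrite | github.com/Tecatech/analytical-computing-systems | lab5/statistical_structure.py | compute
-- ===== SOURCE A (Python) =====
-- def get_bit(v, index):
--     mask = v >> index
--     mask &= 1
--     return mask
--
-- def compute(sbox):
--     keys = list(sbox.keys())
--     delta_a = []
--
--     for key in keys:
--         delta_i = 0
--
--         for bit_idx in range(4):
--             a_i = get_bit(key, bit_idx)
--             x_i = get_bit(sbox[key], bit_idx)
--             delta_i += a_i * x_i
--
--         delta_a.append(delta_i)
--
--     return delta_a
-- ===== SOURCE B (Python) =====
-- def compute(sbox):
--     # popcount of the common low nibble of key and value, per entry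
--     return [((k % 16) & (v % 16)).bit_count() for k, v in sbox.items()]
-- ===== Notes on version B (the rewrite author's own statement) =====
-- stated objective: idiomatic
-- what changed: Replaces the per-key dict lookup plus explicit 4-iteration get_bit multiply-accumulate loop by a single comprehension over the dict items that masks key and value to their low nibble, ANDs them and takes the popcount.
import Mathlib
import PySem

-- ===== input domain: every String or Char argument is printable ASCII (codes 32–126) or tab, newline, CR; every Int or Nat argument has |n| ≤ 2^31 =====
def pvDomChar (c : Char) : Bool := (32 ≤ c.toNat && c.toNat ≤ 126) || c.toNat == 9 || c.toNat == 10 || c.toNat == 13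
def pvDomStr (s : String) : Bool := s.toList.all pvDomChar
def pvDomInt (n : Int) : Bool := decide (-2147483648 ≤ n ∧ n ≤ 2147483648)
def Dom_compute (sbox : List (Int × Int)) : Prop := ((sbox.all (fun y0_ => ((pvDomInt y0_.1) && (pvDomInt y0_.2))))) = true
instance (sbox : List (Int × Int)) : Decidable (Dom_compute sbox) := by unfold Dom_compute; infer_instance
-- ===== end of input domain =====

-- B replaces the per-key lookup plus explicit 4-bit multiply-accumulate loop by one comprehension
-- taking the popcount of the AND of the two low nibbles (idiomatic; same asymptotic cost).

-- ===== PORT A =====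
-- helper get_bit of A; the bit index here is always 0..3, so .toNat is exact for the shift
def get_bit (v : Int) (index : Int) : Int :=
  let mask := v >>> index.toNat
  let mask := PySem.Int.band mask 1
  mask

-- dict → association list: keys = first components in insertion order; sbox[key] = first match.
-- The .getD 0 default is unreachable: every key looked up is a key of the list.
def compute (sbox : List (Int × Int)) : List Int :=
  let keys := sbox.map Prod.fst
  let delta_a : List Int := []
  keys.foldl
    (fun delta_a key =>
      let delta_i : Int :=
        (PySem.List.pyRange 0 4 1).foldl
          (fun delta_i bit_idx =>
            let a_i := get_bit key bit_idx
            let x_i := get_bit ((List.lookup key sbox).getD 0) bit_idx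
            delta_i + a_i * x_i) 0
      delta_a ++ [delta_i]) delta_a

-- ===== PORT B =====
def compute_alt (sbox : List (Int × Int)) : List Int :=
  sbox.map (fun kv =>
    ((PySem.Int.bitCount
        (PySem.Int.band (PySem.Int.mod kv.1 16) (PySem.Int.mod kv.2 16)) : Nat) : Int))

-- ===== PRECONDITION & SPEC =====
-- The list encodes a Python dict, whose keys are distinct; on lists with duplicated first
-- components (not reachable from any dict) A's first-match lookup and B's per-pair value differ.
def Pre_compute (sbox : List (Int × Int)) : Prop := (sbox.map Prod.fst).Nodup
instance (sbox : List (Int × Int)) : Decidable (Pre_compute sbox) := by unfold Pre_compute; infer_instance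
def pvWitness_compute : (List (Int × Int)) := [(1, 3), (2, 2), (15, 15)]
def Spec_compute (sbox : List (Int × Int)) (out : List Int) : Prop := out = compute_alt sbox
instance (sbox : List (Int × Int)) (out : List Int) : Decidable (Spec_compute sbox out) := by unfold Spec_compute; infer_instance

-- ===== CLAIM (what is proved, stated in full; the proofs are below) =====
def Claim_equal_compute : Prop := ∀ (sbox : List (Int × Int)), Dom_compute sbox → Pre_compute sbox → Spec_compute sbox (compute sbox)

-- ===== LEMMAS AND PROOFS =====

-- append-accumulator fold is a map
theorem foldl_append_map {α β : Type} (f : α → β) :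
    ∀ (l : List α) (acc : List β),
      l.foldl (fun a k => a ++ [f k]) acc = acc ++ l.map f := by
  intro l
  induction l with
  | nil => simp
  | cons x xs ih => intro acc; simp [List.foldl, ih]

-- first-match lookup of a member key under distinct keys
theorem lookup_of_mem_nodup {α β : Type} [BEq α] [LawfulBEq α] :
    ∀ (l : List (α × β)) (k : α) (v : β),
      (l.map Prod.fst).Nodup → (k, v) ∈ l → List.lookup k l = some v := by
  intro l
  induction l with
  | nil => intro k v _ h; cases h
  | cons p ps ih =>
      intro k v hnd hm
      simp only [List.map_cons, List.nodup_cons] at hnd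
      rcases List.mem_cons.mp hm with h | h
      · cases h; simp [List.lookup]
      · have hne : (k == p.1) = false := by
          apply beq_false_of_ne
          intro he
          exact hnd.1 (he ▸ (List.mem_map.mpr ⟨(k, v), h, rfl⟩))
        simp [List.lookup, hne]
        exact ih k v hnd.2 h

-- bit c of x as floored division/remainder
theorem get_bit_eq_div_mod (x : Int) (c : Nat) :
    get_bit x (c : Int) = x / 2 ^ c % 2 := by
  show PySem.Int.band (x >>> ((c : Int)).toNat) 1 = x / 2 ^ c % 2
  rw [Int.toNat_natCast, PySem.Int.band_one, Int.shiftRight_eq_div_pow]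
  simp [pysem]

-- the nibble table: per-bit products summed = popcount of the AND, over 0..15
theorem nibble_table :
    ∀ p q : Fin 16,
      (0 + ((p.1 : Int) % 16 / 1 % 2) * ((q.1 : Int) % 16 / 1 % 2)
         + ((p.1 : Int) % 16 / 2 % 2) * ((q.1 : Int) % 16 / 2 % 2)
         + ((p.1 : Int) % 16 / 4 % 2) * ((q.1 : Int) % 16 / 4 % 2)
         + ((p.1 : Int) % 16 / 8 % 2) * ((q.1 : Int) % 16 / 8 % 2) : Int)
        = ((PySem.Int.bitCount ((p.1 &&& q.1 : Nat) : Int) : Nat) : Int) := by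
  decide

-- the inner 4-bit loop of A equals B's nibble popcount, for arbitrary integers
theorem inner_loop_eq (k v : Int) :
    (PySem.List.pyRange 0 4 1).foldl
        (fun delta_i bit_idx => delta_i + get_bit k bit_idx * get_bit v bit_idx) 0
      = ((PySem.Int.bitCount
            (PySem.Int.band (PySem.Int.mod k 16) (PySem.Int.mod v 16)) : Nat) : Int) := by
  have hr : PySem.List.pyRange 0 4 1 = [0, 1, 2, 3] := by decide
  rw [hr]
  have h0 := get_bit_eq_div_mod (c := 0)
  have h1 := get_bit_eq_div_mod (c := 1)
  have h2 := get_bit_eq_div_mod (c := 2)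
  have h3 := get_bit_eq_div_mod (c := 3)
  norm_num at h0 h1 h2 h3
  simp only [List.foldl_cons, List.foldl_nil, h0, h1, h2, h3]
  -- bits 0..3 depend only on the value mod 16
  have ek1 : k % 2 = k % 16 / 1 % 2 := by omega
  have ek2 : k / 2 % 2 = k % 16 / 2 % 2 := by omega
  have ek4 : k / 4 % 2 = k % 16 / 4 % 2 := by omega
  have ek8 : k / 8 % 2 = k % 16 / 8 % 2 := by omega
  have ev1 : v % 2 = v % 16 / 1 % 2 := by omega
  have ev2 : v / 2 % 2 = v % 16 / 2 % 2 := by omega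
  have ev4 : v / 4 % 2 = v % 16 / 4 % 2 := by omega
  have ev8 : v / 8 % 2 = v % 16 / 8 % 2 := by omega
  rw [ek1, ek2, ek4, ek8, ev1, ev2, ev4, ev8]
  have hmk : PySem.Int.mod k 16 = k % 16 := by simp [pysem]
  have hmv : PySem.Int.mod v 16 = v % 16 := by simp [pysem]
  rw [hmk, hmv]
  have hknn : 0 ≤ k % 16 := Int.emod_nonneg k (by norm_num)
  have hvnn : 0 ≤ v % 16 := Int.emod_nonneg v (by norm_num)
  have hklt : k % 16 < 16 := Int.emod_lt_of_pos k (by norm_num)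
  have hvlt : v % 16 < 16 := Int.emod_lt_of_pos v (by norm_num)
  obtain ⟨a, hA⟩ := Int.eq_ofNat_of_zero_le hknn
  obtain ⟨b, hB⟩ := Int.eq_ofNat_of_zero_le hvnn
  have hA16 : a < 16 := by omega
  have hB16 : b < 16 := by omega
  rw [hA, hB, PySem.Int.band_natCast]
  have := nibble_table ⟨a, hA16⟩ ⟨b, hB16⟩
  simp only [] at this
  have ra : ((a : Int)) % 16 = (a : Int) := by omega
  have rb : ((b : Int)) % 16 = (b : Int) := by omega
  rw [ra, rb] at this
  simpa using this

-- ===== VERDICT (by name: the statement is the Claim_ definition above) =====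
theorem compute_spec : Claim_equal_compute := by
  intro sbox _hdom hpre
  unfold Spec_compute compute compute_alt
  rw [foldl_append_map]
  simp only [List.nil_append, List.map_map]
  apply List.map_congr_left
  intro kv hm
  have hl : List.lookup kv.1 sbox = some kv.2 :=
    lookup_of_mem_nodup sbox kv.1 kv.2 hpre (by simpa using hm)
  simp only [Function.comp, hl, Option.getD_some]
  exact inner_loop_eq kv.1 kv.2
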